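-- pv_equiv track=rewrite | github.com/LingruiZhu/Link_Adaptation | sequence_test.py | count_ma_mn
-- ===== SOURCE A (Python) =====
-- def count_ma_mn(samples, max_number):
--     ma_list = list()
--     mn_list = list()
--     ma = 0
--     mn = 0
--
--     for element in samples:
--         if element:
--             ma = ma+1
--             mn = 0
--         else:
--             mn = mn + 1
--             ma = 0
--         ma = max_number if ma > max_number else ma
--         mn = max_number if mn > max_number else mn
--         ma_list.append(ma)
--         mn_list.append(mn)
--     return ma_list, mn_list
-- ===== SOURCE B (Python) =====
-- def count_ma_mn(samples, max_number):
--     # Phase 1: compress samples into maximal runs of equal truthiness.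
--     runs = []
--     for x in samples:
--         t = bool(x)
--         if runs and runs[-1][0] == t:
--             runs[-1][1] += 1
--         else:
--             runs.append([t, 1])
--     # Phase 2: emit capped streak positions per run.
--     ma_list, mn_list = [], []
--     for truthy, length in runs:
--         for k in range(1, length + 1):
--             capped = min(k, max_number)
--             if truthy:
--                 ma_list.append(capped)
--                 mn_list.append(0)
--             else:
--                 ma_list.append(0)
--                 mn_list.append(capped)
--     return ma_list, mn_list
-- ===== Notes on version B (the rewrite author's own statement) =====
-- stated objective: alternative
-- what changed: B replaces A's single stateful pass (two running counters reset/capped per element) with a two-phase run-length decomposition: compress the samples into maximal runs of equal truthiness, then emit min(position, max_number) per position of each run and 0 into the opposite list.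
-- intended difference: On nonempty samples with max_number < 0 A's clamp drags even the freshly reset counter down to max_number, so both lists are all max_number; B emits 0 for the inactive counter (and min(position, max_number) for the active one), which is the intended meaning of a zeroed streak count. — e.g. on count_ma_mn([1], -1): A returns ([-1], [-1]), B returns ([-1], [0])
import Mathlib
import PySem

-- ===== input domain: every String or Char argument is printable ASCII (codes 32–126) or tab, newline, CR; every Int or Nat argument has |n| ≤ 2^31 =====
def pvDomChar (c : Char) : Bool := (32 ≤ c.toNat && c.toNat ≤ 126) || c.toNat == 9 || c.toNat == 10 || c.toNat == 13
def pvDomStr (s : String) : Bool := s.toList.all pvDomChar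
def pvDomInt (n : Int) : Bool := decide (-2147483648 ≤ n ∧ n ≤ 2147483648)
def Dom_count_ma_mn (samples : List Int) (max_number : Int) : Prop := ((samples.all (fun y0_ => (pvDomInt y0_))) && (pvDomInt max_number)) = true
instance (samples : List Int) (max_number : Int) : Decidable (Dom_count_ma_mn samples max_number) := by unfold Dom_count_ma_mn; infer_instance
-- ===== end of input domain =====

-- B computes the capped streak lists by run-length decomposition (compress into maximal
-- truthiness runs, then emit per-run positions, 0 into the opposite list) instead of A's
-- stateful pass; objective: alternative decomposition, same O(n) cost. For max_number < 0
-- the two differ (see D_ below).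

-- ===== PORT A =====
def pvStepA (max_number : Int) (st : List Int × List Int × Int × Int) (element : Int) :
    List Int × List Int × Int × Int :=
  let ma1 := if element != 0 then st.2.2.1 + 1 else 0
  let mn1 := if element != 0 then 0 else st.2.2.2 + 1
  let ma2 := if ma1 > max_number then max_number else ma1
  let mn2 := if mn1 > max_number then max_number else mn1
  (st.1 ++ [ma2], st.2.1 ++ [mn2], ma2, mn2)

def count_ma_mn (samples : List Int) (max_number : Int) : List Int × List Int :=
  let st := samples.foldl (pvStepA max_number) ([], [], 0, 0)
  (st.1, st.2.1)

-- ===== PORT B =====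
-- append t to the run list: bump the last run if it has the same truthiness, else add a new run
def pvAddRun : List (Bool × Nat) → Bool → List (Bool × Nat)
  | [], t => [(t, 1)]
  | [r], t => if r.1 = t then [(r.1, r.2 + 1)] else [r, (t, 1)]
  | r :: s :: rs, t => r :: pvAddRun (s :: rs) t

def pvRuns (samples : List Int) : List (Bool × Nat) :=
  samples.foldl (fun rs x => pvAddRun rs (x != 0)) []

def pvEmit (max_number : Int) (acc : List Int × List Int) (r : Bool × Nat) : List Int × List Int :=
  (PySem.List.pyRange 1 ((r.2 : Int) + 1) 1).foldl (fun acc k =>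
    let capped := min k max_number
    if r.1 then (acc.1 ++ [capped], acc.2 ++ [0])
    else (acc.1 ++ [0], acc.2 ++ [capped])) acc

def count_ma_mn_alt (samples : List Int) (max_number : Int) : List Int × List Int :=
  (pvRuns samples).foldl (pvEmit max_number) ([], [])

-- ===== PRECONDITION & SPEC =====
-- On nonempty samples with max_number < 0, A's clamp drags even the freshly reset counter
-- down to max_number (both lists become all max_number); B emits 0 for the inactive counter
-- and min(position, max_number) for the active one, the intended zeroed streak count.
def D_count_ma_mn (samples : List Int) (max_number : Int) : Prop :=
  max_number < 0 ∧ samples ≠ []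
instance (samples : List Int) (max_number : Int) : Decidable (D_count_ma_mn samples max_number) := by unfold D_count_ma_mn; infer_instance

def Spec_count_ma_mn (samples : List Int) (max_number : Int) (out : List Int × List Int) : Prop := ¬ D_count_ma_mn samples max_number → out = count_ma_mn_alt samples max_number
instance (samples : List Int) (max_number : Int) (out : List Int × List Int) : Decidable (Spec_count_ma_mn samples max_number out) := by unfold Spec_count_ma_mn; infer_instance

def pvDiffWitness_count_ma_mn : List Int × Int := ([1], -1)
def pvDiffWitnessOut_count_ma_mn : (List Int × List Int) × (List Int × List Int) :=
  (([-1], [-1]), ([-1], [0]))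

-- ===== CLAIM (what is proved, stated in full; the proofs are below) =====
def Claim_unchanged_count_ma_mn : Prop := ∀ (samples : List Int) (max_number : Int), Dom_count_ma_mn samples max_number → Spec_count_ma_mn samples max_number (count_ma_mn samples max_number)
def Claim_changed_count_ma_mn : Prop := Dom_count_ma_mn (pvDiffWitness_count_ma_mn.1) (pvDiffWitness_count_ma_mn.2) ∧ D_count_ma_mn (pvDiffWitness_count_ma_mn.1) (pvDiffWitness_count_ma_mn.2) ∧ count_ma_mn (pvDiffWitness_count_ma_mn.1) (pvDiffWitness_count_ma_mn.2) = pvDiffWitnessOut_count_ma_mn.1 ∧ count_ma_mn_alt (pvDiffWitness_count_ma_mn.1) (pvDiffWitness_count_ma_mn.2) = pvDiffWitnessOut_count_ma_mn.2 ∧ pvDiffWitnessOut_count_ma_mn.1 ≠ pvDiffWitnessOut_count_ma_mn.2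
def Claim_exact_count_ma_mn : Prop := ∀ (samples : List Int) (max_number : Int), Dom_count_ma_mn samples max_number → D_count_ma_mn samples max_number → count_ma_mn samples max_number ≠ count_ma_mn_alt samples max_number

-- ===== LEMMAS AND PROOFS =====

-- reference spec: outputs of the remaining elements, given the current run truthiness b and streak n
def specGo (m : Int) (b : Bool) (n : Nat) : List Int → List Int × List Int
  | [] => ([], [])
  | y :: ys =>
    let t := y != 0
    let n' := if t = b then n + 1 else 1
    let p := specGo m t n' ys
    ((if t then min ((n' : Int)) m else 0) :: p.1,
     (if t then 0 else min ((n' : Int)) m) :: p.2)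

-- output of a whole run of truthiness b and length n
def pref (m : Int) (b : Bool) (n : Nat) : List Int × List Int :=
  ((PySem.List.pyRange 1 ((n : Int) + 1) 1).map (fun k => if b then min k m else 0),
   (PySem.List.pyRange 1 ((n : Int) + 1) 1).map (fun k => if b then 0 else min k m))

def flatOut (m : Int) : List (Bool × Nat) → List Int × List Int
  | [] => ([], [])
  | r :: rs => ((pref m r.1 r.2).1 ++ (flatOut m rs).1, (pref m r.1 r.2).2 ++ (flatOut m rs).2)

-- grouping as a left-to-right recursion with the current run as state
def goRuns (b : Bool) (n : Nat) : List Int → List (Bool × Nat)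
  | [] => [(b, n)]
  | y :: ys => if (y != 0) = b then goRuns b (n + 1) ys else (b, n) :: goRuns (y != 0) 1 ys

lemma pvCapg (m a : Int) : (if a > m then m else a) = min a m := by
  split_ifs <;> omega

lemma pvMinSucc (m k : Int) : min (min k m + 1) m = min (k + 1) m := by omega

lemma pvMinZero (m : Int) (hm : 0 ≤ m) : min (0 : Int) m = 0 := by omega

lemma A_loop (m : Int) (hm : 0 ≤ m) : ∀ (ys : List Int) (b : Bool) (n : Nat) (maL mnL : List Int),
    (ys.foldl (pvStepA m) (maL, mnL, if b then min (n : Int) m else 0,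
        if b then 0 else min (n : Int) m)).1 = maL ++ (specGo m b n ys).1
  ∧ (ys.foldl (pvStepA m) (maL, mnL, if b then min (n : Int) m else 0,
        if b then 0 else min (n : Int) m)).2.1 = mnL ++ (specGo m b n ys).2 := by
  intro ys
  induction ys with
  | nil => intro b n maL mnL; simp [specGo]
  | cons y ys ih =>
    intro b n maL mnL
    simp only [List.foldl_cons]
    cases hyt : (y != 0) with
    | true =>
      cases b with
      | true =>
        simp only [pvStepA, hyt, ↓reduceIte, pvCapg, pvMinSucc, pvMinZero m hm]
        have h := ih true (n + 1) (maL ++ [min ((n : Int) + 1) m]) (mnL ++ [(0 : Int)])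
        push_cast at h
        simp only [↓reduceIte] at h
        refine ⟨?_, ?_⟩ <;> [rw [h.1]; rw [h.2]] <;> simp [specGo, hyt]
      | false =>
        simp only [pvStepA, hyt, Bool.false_eq_true, ↓reduceIte, pvCapg, pvMinZero m hm,
          zero_add]
        have h := ih true 1 (maL ++ [min (1 : Int) m]) (mnL ++ [(0 : Int)])
        push_cast at h
        norm_num at h ⊢
        refine ⟨?_, ?_⟩ <;> [rw [h.1]; rw [h.2]] <;> simp [specGo, hyt]
    | false =>
      cases b with
      | true =>
        simp only [pvStepA, hyt, Bool.false_eq_true, ↓reduceIte, pvCapg, pvMinZero m hm,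
          zero_add]
        have h := ih false 1 (maL ++ [(0 : Int)]) (mnL ++ [min (1 : Int) m])
        push_cast at h
        norm_num at h ⊢
        refine ⟨?_, ?_⟩ <;> [rw [h.1]; rw [h.2]] <;> simp [specGo, hyt]
      | false =>
        simp only [pvStepA, hyt, Bool.false_eq_true, ↓reduceIte, pvCapg, pvMinSucc,
          pvMinZero m hm]
        have h := ih false (n + 1) (maL ++ [(0 : Int)]) (mnL ++ [min ((n : Int) + 1) m])
        push_cast at h
        refine ⟨?_, ?_⟩ <;> [rw [h.1]; rw [h.2]] <;> simp [specGo, hyt]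

lemma inner_loop (m : Int) (t : Bool) : ∀ (ks : List Int) (acc : List Int × List Int),
    ks.foldl (fun acc k =>
      let capped := min k m
      if t then (acc.1 ++ [capped], acc.2 ++ [0]) else (acc.1 ++ [0], acc.2 ++ [capped])) acc
  = (acc.1 ++ ks.map (fun k => if t then min k m else 0),
     acc.2 ++ ks.map (fun k => if t then 0 else min k m)) := by
  intro ks
  induction ks with
  | nil => intro acc; simp
  | cons k ks ih =>
    intro acc
    simp only [List.foldl_cons, List.map_cons]
    rw [ih]
    cases t <;> simp

lemma pvEmit_eq (m : Int) (r : Bool × Nat) (acc : List Int × List Int) :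
    pvEmit m acc r = (acc.1 ++ (pref m r.1 r.2).1, acc.2 ++ (pref m r.1 r.2).2) := by
  simp only [pvEmit, pref]
  exact inner_loop m r.1 _ acc

lemma outer_loop (m : Int) : ∀ (runs : List (Bool × Nat)) (acc : List Int × List Int),
    runs.foldl (pvEmit m) acc = (acc.1 ++ (flatOut m runs).1, acc.2 ++ (flatOut m runs).2) := by
  intro runs
  induction runs with
  | nil => intro acc; simp [flatOut]
  | cons r rs ih =>
    intro acc
    simp only [List.foldl_cons]
    rw [pvEmit_eq, ih]
    simp [flatOut]

lemma addRun_snoc : ∀ (rs : List (Bool × Nat)) (b : Bool) (n : Nat) (t : Bool),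
    pvAddRun (rs ++ [(b, n)]) t = rs ++ (if b = t then [(b, n + 1)] else [(b, n), (t, 1)]) := by
  intro rs
  induction rs with
  | nil => intro b n t; simp [pvAddRun]
  | cons r rs ih =>
    intro b n t
    cases rs with
    | nil => simp [pvAddRun]
    | cons s rs' =>
      have : ((r :: s :: rs') ++ [(b, n)]) = r :: (s :: rs') ++ [(b, n)] := rfl
      rw [this]
      show r :: pvAddRun ((s :: rs') ++ [(b, n)]) t = _
      rw [ih]
      simp

lemma runs_go : ∀ (ys : List Int) (rs : List (Bool × Nat)) (b : Bool) (n : Nat),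
    List.foldl (fun rs x => pvAddRun rs (x != 0)) (rs ++ [(b, n)]) ys = rs ++ goRuns b n ys := by
  intro ys
  induction ys with
  | nil => intro rs b n; simp [goRuns]
  | cons y ys ih =>
    intro rs b n
    simp only [List.foldl_cons]
    rw [addRun_snoc]
    by_cases h : (y != 0) = b
    · rw [h, if_pos rfl, ih]
      simp [goRuns, h]
    · have hb : ¬ (b = (y != 0)) := fun hh => h hh.symm
      rw [if_neg hb]
      have : rs ++ [(b, n), ((y != 0), 1)] = (rs ++ [(b, n)]) ++ [((y != 0), 1)] := by simp
      rw [this, ih]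
      simp [goRuns, h]

lemma pvRuns_cons (x : Int) (xs : List Int) :
    pvRuns (x :: xs) = goRuns (x != 0) 1 xs := by
  have h0 : pvAddRun [] (x != 0) = [((x != 0), 1)] := rfl
  simp only [pvRuns, List.foldl_cons, h0]
  have := runs_go xs [] (x != 0) 1
  simpa using this

lemma pref_one (m : Int) (t : Bool) :
    pref m t 1 = ([if t then min 1 m else 0], [if t then 0 else min 1 m]) := by
  have h : PySem.List.pyRange 1 ((1 : Nat) + 1) 1 = [1] := by
    have := PySem.List.pyRange_one_singleton (a := (1 : Int))
    norm_num at this ⊢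
    exact this
  simp only [pref, h, List.map_cons, List.map_nil]

lemma flat_go (m : Int) : ∀ (ys : List Int) (b : Bool) (n : Nat),
    flatOut m (goRuns b n ys)
  = ((pref m b n).1 ++ (specGo m b n ys).1, (pref m b n).2 ++ (specGo m b n ys).2) := by
  intro ys
  induction ys with
  | nil => intro b n; simp [goRuns, flatOut, specGo]
  | cons y ys ih =>
    intro b n
    by_cases h : (y != 0) = b
    · rw [show goRuns b n (y :: ys) = goRuns b (n + 1) ys from by simp [goRuns, h]]
      rw [ih]
      have h1 : (1 : Int) ≤ (n : Int) + 1 := by omega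
      have hr : PySem.List.pyRange 1 (((n + 1 : Nat) : Int) + 1) 1
          = PySem.List.pyRange 1 ((n : Int) + 1) 1 ++ [(n : Int) + 1] := by
        rw [show (((n + 1 : Nat) : Int) + 1) = ((n : Int) + 1) + 1 from by push_cast; ring]
        exact PySem.List.pyRange_one_succ_right h1
      simp only [pref, hr, List.map_append, List.map_cons, List.map_nil]
      simp [specGo, h, List.append_assoc]
    · rw [show goRuns b n (y :: ys) = (b, n) :: goRuns (y != 0) 1 ys from by simp [goRuns, h]]
      simp only [flatOut]
      rw [ih]
      simp [specGo, h, pref_one]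

lemma main_eq (samples : List Int) (m : Int) (hm : 0 ≤ m) :
    count_ma_mn samples m = count_ma_mn_alt samples m := by
  cases samples with
  | nil => rfl
  | cons x xs =>
    have hA := A_loop m hm xs (x != 0) 1
    -- first step of A from (0, 0)
    have hstep : pvStepA m ([], [], 0, 0) x
        = ([if (x != 0) then min 1 m else 0], [if (x != 0) then 0 else min 1 m],
           (if (x != 0) then min 1 m else 0), (if (x != 0) then 0 else min 1 m)) := by
      cases hx : (x != 0) <;>
        simp [pvStepA, hx, pvCapg, pvMinZero m hm, zero_add]
    have hB := pvRuns_cons x xs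
    have hcast : ((1 : Nat) : Int) = 1 := by norm_num
    have hAL := hA [if (x != 0) then min 1 m else 0] [if (x != 0) then 0 else min 1 m]
    rw [hcast] at hAL
    have hflat := flat_go m xs (x != 0) 1
    calc count_ma_mn (x :: xs) m
        = ((List.foldl (pvStepA m) (pvStepA m ([], [], 0, 0) x) xs).1,
           (List.foldl (pvStepA m) (pvStepA m ([], [], 0, 0) x) xs).2.1) := rfl
      _ = ([if (x != 0) then min 1 m else 0] ++ (specGo m (x != 0) 1 xs).1,
           [if (x != 0) then 0 else min 1 m] ++ (specGo m (x != 0) 1 xs).2) := by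
            rw [hstep]; exact Prod.ext hAL.1 hAL.2
      _ = count_ma_mn_alt (x :: xs) m := by
            rw [count_ma_mn_alt, hB, outer_loop m _ ([], [])]
            rw [hflat, pref_one]
            simp

-- A's foldl only ever appends to the two output lists
lemma A_prefix (m : Int) : ∀ (ys : List Int) (st : List Int × List Int × Int × Int),
    ∃ u v, (ys.foldl (pvStepA m) st).1 = st.1 ++ u ∧ (ys.foldl (pvStepA m) st).2.1 = st.2.1 ++ v := by
  intro ys
  induction ys with
  | nil => intro st; exact ⟨[], [], by simp, by simp⟩
  | cons y ys ih =>
    intro st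
    obtain ⟨u, v, hu, hv⟩ := ih (pvStepA m st y)
    have hst1 : (pvStepA m st y).1 = st.1 ++ [(pvStepA m st y).2.2.1] := rfl
    have hst2 : (pvStepA m st y).2.1 = st.2.1 ++ [(pvStepA m st y).2.2.2] := rfl
    refine ⟨(pvStepA m st y).2.2.1 :: u, (pvStepA m st y).2.2.2 :: v, ?_, ?_⟩
    · simp only [List.foldl_cons, hu, hst1]; simp
    · simp only [List.foldl_cons, hv, hst2]; simp

-- the first run produced by goRuns has truthiness b and positive length
lemma goRuns_head : ∀ (ys : List Int) (b : Bool) (n : Nat), 1 ≤ n →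
    ∃ n' rest, goRuns b n ys = (b, n') :: rest ∧ 1 ≤ n' := by
  intro ys
  induction ys with
  | nil => intro b n hn; exact ⟨n, [], rfl, hn⟩
  | cons y ys ih =>
    intro b n hn
    by_cases h : (y != 0) = b
    · obtain ⟨n', rest, hr, hn'⟩ := ih b (n + 1) (by omega)
      exact ⟨n', rest, by simp [goRuns, h, hr], hn'⟩
    · exact ⟨n, goRuns (y != 0) 1 ys, by simp [goRuns, h], hn⟩

lemma pref_head (m : Int) (b : Bool) (n : Nat) (hn : 1 ≤ n) :
    ∃ u v, (pref m b n).1 = (if b then min 1 m else 0) :: u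
         ∧ (pref m b n).2 = (if b then 0 else min 1 m) :: v := by
  have h1 : (1 : Int) < (n : Int) + 1 := by omega
  have hr := PySem.List.pyRange_one_cons h1
  have e1 : (pref m b n).1 = (if b then min 1 m else 0)
      :: (PySem.List.pyRange (1 + 1) ((n : Int) + 1) 1).map (fun k => if b then min k m else 0) := by
    simp [pref, hr]
  have e2 : (pref m b n).2 = (if b then 0 else min 1 m)
      :: (PySem.List.pyRange (1 + 1) ((n : Int) + 1) 1).map (fun k => if b then 0 else min k m) := by
    simp [pref, hr]
  exact ⟨_, _, e1, e2⟩

lemma main_ne (samples : List Int) (m : Int) (hm : m < 0) (hne : samples ≠ []) :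
    count_ma_mn samples m ≠ count_ma_mn_alt samples m := by
  cases samples with
  | nil => exact absurd rfl hne
  | cons x xs =>
    -- A's first entries are both m
    have hstep : pvStepA m ([], [], 0, 0) x = ([m], [m], m, m) := by
      cases hx : (x != 0) <;>
        simp [pvStepA, hx, zero_add, show (1 : Int) > m from by omega,
          show (0 : Int) > m from hm]
    obtain ⟨u, v, hu, hv⟩ := A_prefix m xs (pvStepA m ([], [], 0, 0) x)
    rw [hstep] at hu hv
    have hA1 : (count_ma_mn (x :: xs) m).1 = m :: u := by
      simp only [count_ma_mn, List.foldl_cons, hstep]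
      simpa using hu
    have hA2 : (count_ma_mn (x :: xs) m).2 = m :: v := by
      simp only [count_ma_mn, List.foldl_cons, hstep]
      simpa using hv
    -- B's first entries
    obtain ⟨n', rest, hg, hn'⟩ := goRuns_head xs (x != 0) 1 le_rfl
    obtain ⟨u', v', hp1, hp2⟩ := pref_head m (x != 0) n' hn'
    have hB : count_ma_mn_alt (x :: xs) m
        = ((pref m (x != 0) n').1 ++ (flatOut m rest).1,
           (pref m (x != 0) n').2 ++ (flatOut m rest).2) := by
      rw [count_ma_mn_alt, pvRuns_cons, hg, outer_loop m _ ([], [])]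
      simp [flatOut]
    intro hEq
    cases hx : (x != 0) with
    | true =>
      -- mn_list heads: A gives m, B gives 0
      have h2 := congrArg Prod.snd hEq
      rw [hA2, hB] at h2
      simp only at h2
      rw [hp2] at h2
      simp [hx] at h2
      omega
    | false =>
      -- ma_list heads: A gives m, B gives 0
      have h1 := congrArg Prod.fst hEq
      rw [hA1, hB] at h1
      simp only at h1
      rw [hp1] at h1
      simp [hx] at h1
      omega

-- ===== VERDICT (by name: the statement is the Claim_ definition above) =====
theorem count_ma_mn_spec : Claim_unchanged_count_ma_mn := by
  intro samples max_number _ hnd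
  by_cases hm : 0 ≤ max_number
  · exact main_eq samples max_number hm
  · cases samples with
    | nil => rfl
    | cons x xs =>
      refine absurd ?_ hnd
      unfold D_count_ma_mn
      exact ⟨by omega, by simp⟩

theorem count_ma_mn_changed : Claim_changed_count_ma_mn := by
  unfold Claim_changed_count_ma_mn; decide

theorem count_ma_mn_tight : Claim_exact_count_ma_mn := by
  intro samples max_number _ hD
  exact main_ne samples max_number hD.1 hD.2
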